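-- pv_equiv track=rewrite | github.com/AlexLB97/Future_Value_Bar_Graph | futvalGraph.py | incrementSize
-- ===== SOURCE A (Python) =====
-- def incrementFind(valueList, interval):
--     if (valueList[-1] // interval) < 20:
--         return interval
--     else:
--         interval = interval + 1000
--         return incrementFind(valueList, interval)
--
-- def incrementSize(valueList):
--     interval = incrementFind(valueList, 1000)
--     incrementRoundValue = [1000, 5000, 10000, 25000, 50000, 100000, 250000, 500000]
--     incrementChanges = [0, 10000, 25000, 100000, 500000, 1000000, 5000000, 10000000, 100000000]
--     changeIndex = 0
--     sizeIndex = 0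
--     for element in incrementChanges:
--         if interval > element:
--             changeIndex += 1
--         else:
--             break
--     sizeIndex = changeIndex - 1
--     return incrementRoundValue[sizeIndex], interval
-- ===== SOURCE B (Python) =====
-- # Re-implementation: the interval comes from one floor division instead of
-- # counting up by 1000, and the size table is a single threshold scan.
-- def incrementSize(valueList):
--     last = valueList[-1]
--     interval = 1000 * max(last // 20000 + 1, 1)
--     for bound, size in ((10000, 1000), (25000, 5000), (100000, 10000),
--                         (500000, 25000), (1000000, 50000), (5000000, 100000),
--                         (10000000, 250000), (100000000, 500000)):
--         if interval <= bound:
--             return size, interval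
-- ===== Notes on version B (the rewrite author's own statement) =====
-- stated objective: alternative
-- what changed: B computes the interval by a single floor division (smallest multiple of 1000 whose 20-fold exceeds the last value) instead of A's +1000-at-a-time recursion, and replaces A's counter-plus-index two-table lookup by one scan over (threshold, size) pairs.
import Mathlib
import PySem

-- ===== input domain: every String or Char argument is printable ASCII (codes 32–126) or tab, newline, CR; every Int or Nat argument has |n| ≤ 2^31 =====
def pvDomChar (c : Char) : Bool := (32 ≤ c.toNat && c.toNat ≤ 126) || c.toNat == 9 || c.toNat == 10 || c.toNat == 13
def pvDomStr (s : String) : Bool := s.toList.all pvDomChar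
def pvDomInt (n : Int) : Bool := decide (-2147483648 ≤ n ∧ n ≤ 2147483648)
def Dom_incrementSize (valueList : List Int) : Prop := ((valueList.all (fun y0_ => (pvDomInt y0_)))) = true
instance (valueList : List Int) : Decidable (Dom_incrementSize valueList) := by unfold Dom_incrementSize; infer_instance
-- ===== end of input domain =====

-- B computes the interval with one floor division instead of A's +1000-at-a-time
-- recursion, and one (threshold, size) scan instead of A's counter + two tables.

-- ===== PORT A =====
-- incrementFind: recursion ported with a fuel counter as totality guard; within
-- Pre_ the fuel is never exhausted (at most 950 steps are needed).
def incrementFindFuel (last : Int) : Int → Nat → Int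
  | interval, 0 => interval
  | interval, fuel + 1 =>
    if PySem.Int.floordiv last interval < 20 then interval
    else incrementFindFuel last (interval + 1000) fuel

-- the 'for element in incrementChanges: if interval > element: changeIndex += 1 else: break' loop
def countLess (interval : Int) : List Int → Int
  | [] => 0
  | e :: rest => if interval > e then 1 + countLess interval rest else 0

def incrementSize (valueList : List Int) : Int × Int :=
  match PySem.List.pyGet? valueList (-1) with
  | none => (0, 0)   -- IndexError on empty list; excluded by Pre_
  | some last =>
    let interval := incrementFindFuel last 1000 100000
    let changeIndex := countLess interval [0, 10000, 25000, 100000, 500000, 1000000, 5000000, 10000000, 100000000]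
    let sizeIndex := changeIndex - 1
    match PySem.List.pyGet? [1000, 5000, 10000, 25000, 50000, 100000, 250000, 500000] sizeIndex with
    | none => (0, 0)   -- IndexError (interval beyond the table); excluded by Pre_
    | some s => (s, interval)

-- ===== PORT B =====
def pickSize (interval : Int) : List (Int × Int) → Int × Int
  | [] => (0, 0)   -- loop fall-through (Python B returns None); unreachable within Pre_
  | (bound, size) :: rest =>
    if interval ≤ bound then (size, interval) else pickSize interval rest

def incrementSize_alt (valueList : List Int) : Int × Int :=
  match PySem.List.pyGet? valueList (-1) with
  | none => (0, 0)   -- IndexError on empty list; excluded by Pre_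
  | some last =>
    let interval := 1000 * max (PySem.Int.floordiv last 20000 + 1) 1
    pickSize interval [(10000, 1000), (25000, 5000), (100000, 10000),
                       (500000, 25000), (1000000, 50000), (5000000, 100000),
                       (10000000, 250000), (100000000, 500000)]

-- ===== PRECONDITION & SPEC =====
-- Pre_ excludes exactly the inputs where A raises: the empty list (IndexError),
-- and last elements ≥ 19000000, on which A either overruns Python's recursion
-- limit (RecursionError, from ≈2·10^7 on) or overruns its size table
-- (IndexError, from 2·10^9 on); the margin 19000000 keeps a safe distance from
-- the stack-depth-dependent RecursionError boundary.
def Pre_incrementSize (valueList : List Int) : Prop :=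
  (PySem.List.pyGet? valueList (-1)).getD 19000000 < 19000000
instance (valueList : List Int) : Decidable (Pre_incrementSize valueList) := by unfold Pre_incrementSize; infer_instance
def pvWitness_incrementSize : List Int := [5]

def Spec_incrementSize (valueList : List Int) (out : Int × Int) : Prop := out = incrementSize_alt valueList
instance (valueList : List Int) (out : Int × Int) : Decidable (Spec_incrementSize valueList out) := by unfold Spec_incrementSize; infer_instance

-- ===== CLAIM (what is proved, stated in full; the proofs are below) =====
def Claim_equal_incrementSize : Prop := ∀ (valueList : List Int), Dom_incrementSize valueList → Pre_incrementSize valueList → Spec_incrementSize valueList (incrementSize valueList)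

-- ===== LEMMAS AND PROOFS =====

-- the target value of the interval search
def kOf (last : Int) : Int := max (PySem.Int.floordiv last 20000 + 1) 1

theorem kOf_bounds (last : Int) :
    (1 ≤ kOf last ∧ last < 20000 * kOf last) ∧
    (∀ j : Int, 1 ≤ j → last < 20000 * j → kOf last ≤ j) := by
  have h := (PySem.Int.floordiv_eq_iff_of_pos (a := last) (b := 20000) (q := PySem.Int.floordiv last 20000) (by norm_num)).1 rfl
  unfold kOf
  constructor
  · constructor
    · exact le_max_right _ _
    · rcases max_cases (PySem.Int.floordiv last 20000 + 1) 1 with ⟨he, _⟩ | ⟨he, _⟩ <;> rw [he] <;> omega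
  · intro j hj hlt
    rcases max_cases (PySem.Int.floordiv last 20000 + 1) 1 with ⟨he, _⟩ | ⟨he, _⟩ <;> rw [he] <;> nlinarith

theorem find_eq (fuel : Nat) (last : Int) : ∀ j : Int, 1 ≤ j → j ≤ kOf last →
    (kOf last - j).toNat < fuel → incrementFindFuel last (1000 * j) fuel = 1000 * kOf last := by
  induction fuel with
  | zero => intro j _ _ hf; omega
  | succ fuel ih =>
    intro j hj hjk hf
    obtain ⟨⟨hk1, hklt⟩, hmin⟩ := kOf_bounds last
    have hpos : (0 : Int) < 1000 * j := by omega
    rw [incrementFindFuel]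
    by_cases hc : last < 20 * (1000 * j)
    · rw [if_pos ((PySem.Int.floordiv_lt_iff_lt_mul hpos).2 hc)]
      have : kOf last ≤ j := hmin j hj (by omega)
      omega
    · rw [if_neg (fun h => hc ((PySem.Int.floordiv_lt_iff_lt_mul hpos).1 h))]
      have hjlt : j < kOf last := by
        by_contra hcon
        have hje : j = kOf last := by omega
        subst hje
        omega
      have : 1000 * j + 1000 = 1000 * (j + 1) := by ring
      rw [this]
      exact ih (j + 1) (by omega) (by omega) (by omega)

set_option maxHeartbeats 1000000 in
theorem table_eq (I : Int) (h1 : 0 < I) (h2 : I ≤ 100000000) :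
    (match PySem.List.pyGet? [1000, 5000, 10000, 25000, 50000, 100000, 250000, 500000]
        (countLess I [0, 10000, 25000, 100000, 500000, 1000000, 5000000, 10000000, 100000000] - 1) with
     | none => ((0 : Int), (0 : Int))
     | some s => (s, I)) =
    pickSize I [(10000, 1000), (25000, 5000), (100000, 10000),
                (500000, 25000), (1000000, 50000), (5000000, 100000),
                (10000000, 250000), (100000000, 500000)] := by
  simp only [countLess, pickSize]
  split_ifs <;> first | rfl | omega

-- ===== VERDICT (by name: the statement is the Claim_ definition above) =====
theorem incrementSize_spec : Claim_equal_incrementSize := by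
  intro valueList _ hPre
  unfold Spec_incrementSize incrementSize incrementSize_alt
  unfold Pre_incrementSize at hPre
  cases hget : PySem.List.pyGet? valueList (-1) with
  | none => rw [hget] at hPre
  | some last =>
    rw [hget] at hPre
    simp only [Option.getD_some] at hPre
    obtain ⟨⟨hk1, hklt⟩, hmin⟩ := kOf_bounds last
    have hkub : kOf last ≤ 950 := hmin 950 (by omega) (by omega)
    have hfind : incrementFindFuel last 1000 100000 = 1000 * kOf last := by
      have := find_eq 100000 last 1 (by omega) hk1 (by omega)
      simpa using this
    simp only [hfind]
    exact table_eq (1000 * kOf last) (by omega) (by omega)
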